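-- pv_equiv track=rewrite | github.com/mato-meciar/kompilatory | cv01.py | uloha1
-- ===== SOURCE A (Python) =====
-- def uloha1(input):
--     words = len(input.split())
--     spaces = input.count(' ')
--     other = 0
--     for char in input:
--         if not char.isalpha() and not char.isspace():
--             other += 1
--     return 'subor obsahuje ' + str(words) + ' slov, ' + str(spaces) + ' medzier a ' + str(other) + ' inych znakov'
-- ===== SOURCE B (Python) =====
-- def uloha1(input):
--     words = spaces = other = 0
--     in_word = False
--     for ch in input:
--         if ch.isspace():
--             if ch == ' ':
--                 spaces += 1
--             in_word = False
--         else: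
--             if not in_word:
--                 words += 1
--             if not ch.isalpha():
--                 other += 1
--             in_word = True
--     return 'subor obsahuje ' + str(words) + ' slov, ' + str(spaces) + ' medzier a ' + str(other) + ' inych znakov'
-- ===== Notes on version B (the rewrite author's own statement) =====
-- stated objective: alternative
-- what changed: Replaces three separate passes (split() to count words, a count of space characters, and a loop for other chars) with one pass maintaining three counters and an in_word flag.
import Mathlib
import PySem

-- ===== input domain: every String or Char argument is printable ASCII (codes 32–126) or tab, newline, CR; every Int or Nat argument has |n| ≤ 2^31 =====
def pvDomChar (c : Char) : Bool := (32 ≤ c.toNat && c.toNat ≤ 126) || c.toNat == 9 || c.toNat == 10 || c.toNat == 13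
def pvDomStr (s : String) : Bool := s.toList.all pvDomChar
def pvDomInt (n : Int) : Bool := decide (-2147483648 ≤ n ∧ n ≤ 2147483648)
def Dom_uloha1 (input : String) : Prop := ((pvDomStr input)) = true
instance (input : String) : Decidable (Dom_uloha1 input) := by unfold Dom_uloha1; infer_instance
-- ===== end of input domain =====

-- B replaces A's three passes over the string (split() for words, a count of space characters, a loop
-- for other chars) by ONE pass with three counters and an in_word flag (alternative
-- decomposition, same cost).

-- ===== PORT A =====
def uloha1 (input : String) : String :=
  let words : Int := (PySem.Str.split₀ input).length
  let spaces : Int := PySem.Str.count input " "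
  let other : Int := input.toList.foldl
    (fun acc c => if !PySem.Chars.isalpha c && !PySem.Chars.isspace c then acc + 1 else acc) 0
  "subor obsahuje " ++ PySem.Int.toStr words ++ " slov, " ++ PySem.Int.toStr spaces ++
    " medzier a " ++ PySem.Int.toStr other ++ " inych znakov"

-- ===== PORT B =====
-- one step of B's loop: state is (words, spaces, other, in_word)
def uloha1Step (st : Int × Int × Int × Bool) (c : Char) : Int × Int × Int × Bool :=
  let (w, sp, ot, inw) := st
  if PySem.Chars.isspace c then
    (w, (if c = ' ' then sp + 1 else sp), ot, false)
  else
    ((if inw then w else w + 1), sp, (if PySem.Chars.isalpha c then ot else ot + 1), true)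

def uloha1_alt (input : String) : String :=
  let st := input.toList.foldl uloha1Step (0, 0, 0, false)
  "subor obsahuje " ++ PySem.Int.toStr st.1 ++ " slov, " ++ PySem.Int.toStr st.2.1 ++
    " medzier a " ++ PySem.Int.toStr st.2.2.1 ++ " inych znakov"

-- ===== PRECONDITION & SPEC =====
def Spec_uloha1 (input : String) (out : String) : Prop := out = uloha1_alt input
instance (input : String) (out : String) : Decidable (Spec_uloha1 input out) := by unfold Spec_uloha1; infer_instance

-- ===== CLAIM (what is proved, stated in full; the proofs are below) =====
def Claim_equal_uloha1 : Prop := ∀ (input : String), Dom_uloha1 input → Spec_uloha1 input (uloha1 input)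

-- ===== LEMMAS AND PROOFS =====

-- number of whitespace-separated words of l, given whether we are currently inside a word
def cntWords : List Char → Bool → Nat
  | [], _ => 0
  | c :: rest, inw =>
    if PySem.Chars.isspace c then cntWords rest false
    else (if inw then 0 else 1) + cntWords rest true

-- the in_word flag after processing l starting from flag inw
def finFlag : List Char → Bool → Bool
  | [], inw => inw
  | c :: rest, _ => finFlag rest (!PySem.Chars.isspace c)

theorem split₀_go_length (l : List Char) : ∀ (cur : List Char) (accs : List (List Char)),
    (PySem.Chars.split₀.go l cur accs).length
      = accs.length + (if cur.isEmpty then 0 else 1) + cntWords l (!cur.isEmpty) := by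
  induction l with
  | nil =>
    intro cur accs
    by_cases h : cur.isEmpty <;> simp [PySem.Chars.split₀.go, h, cntWords]
  | cons c rest ih =>
    intro cur accs
    by_cases hs : PySem.Chars.isspace c
    · by_cases h : cur.isEmpty
      · simp [PySem.Chars.split₀.go, hs, h, cntWords, ih]
      · simp [PySem.Chars.split₀.go, hs, h, cntWords, ih]
    · by_cases h : cur.isEmpty
      · simp [PySem.Chars.split₀.go, hs, h, cntWords, ih]
        omega
      · simp [PySem.Chars.split₀.go, hs, h, cntWords, ih]

theorem split₀_length (l : List Char) :
    (PySem.Chars.split₀ l).length = cntWords l false := by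
  simpa using split₀_go_length l [] []

theorem count_go_single (c : Char) (l : List Char) : ∀ (fuel acc : Nat), l.length ≤ fuel →
    PySem.Chars.count.go [c] fuel l acc = acc + l.count c := by
  induction l with
  | nil => intro fuel acc _; cases fuel <;> simp [PySem.Chars.count.go]
  | cons h t ih =>
    intro fuel acc hle
    cases fuel with
    | zero => simp at hle
    | succ n =>
      simp only [List.length_cons, Nat.succ_le_succ_iff] at hle
      by_cases hc : c = h
      · subst hc
        simp only [PySem.Chars.count.go, List.isPrefixOf, BEq.rfl, Bool.and_eq_true,
          and_true, if_true, List.length_cons, List.length_nil,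
          List.drop_succ_cons, List.drop_zero]
        rw [ih n (acc + 1) hle]
        simp
        omega
      · have hbe : (c == h) = false := by simp [hc]
        simp only [PySem.Chars.count.go, List.isPrefixOf, hbe, Bool.false_and,
          Bool.false_eq_true, if_false]
        rw [ih n acc hle]
        simp [Ne.symm hc]

theorem count_single (c : Char) (l : List Char) :
    PySem.Chars.count l [c] = l.count c := by
  simp [PySem.Chars.count, count_go_single c l l.length 0 le_rfl]

-- B's loop invariant: the fold computes the three counts and the final flag
theorem foldl_step (l : List Char) : ∀ (w sp ot : Int) (inw : Bool),
    l.foldl uloha1Step (w, sp, ot, inw)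
      = (w + (cntWords l inw : Int), sp + (l.count ' ' : Int),
         ot + (l.countP (fun c => !PySem.Chars.isalpha c && !PySem.Chars.isspace c) : Int),
         finFlag l inw) := by
  induction l with
  | nil => intro w sp ot inw; simp [cntWords, finFlag]
  | cons c rest ih =>
    intro w sp ot inw
    by_cases hs : PySem.Chars.isspace c
    · by_cases hsp : c = ' '
      · subst hsp
        simp [uloha1Step, hs, cntWords, finFlag, ih]
        omega
      · simp [uloha1Step, hs, hsp, cntWords, finFlag, ih]
    · have hsp : c ≠ ' ' := fun h => by subst h; exact hs (by decide)
      by_cases ha : PySem.Chars.isalpha c <;> by_cases hi : inw <;>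
        simp [uloha1Step, hs, hsp, ha, hi, cntWords, finFlag, ih] <;> omega

-- ===== VERDICT (by name: the statement is the Claim_ definition above) =====
theorem uloha1_spec : Claim_equal_uloha1 := by
  intro input _
  unfold Spec_uloha1 uloha1 uloha1_alt
  rw [foldl_step]
  have hw : ((PySem.Str.split₀ input).length : Int) = (0 : Int) + cntWords input.toList false := by
    simp [PySem.Str.split₀, split₀_length]
  have hsp : (PySem.Str.count input " " : Int) = (0 : Int) + (input.toList.count ' ' : Int) := by
    have : (" ").toList = [' '] := rfl
    simp [PySem.Str.count_eq, this, count_single]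
  rw [hw, hsp, PySem.List.foldl_if_add_one]
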